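-- pv_equiv track=rewrite | github.com/jasontan656/Otctopus_OS_AgentConsole | Word-docs/tooling_governance/default/scripts/tooling_change_ledger.py | layer_docs_for_paths
-- ===== SOURCE A (Python) =====
-- def layer_docs_for_paths(paths: list[str]) -> list[str]:
--     docs: set[str] = set()
--     for p in paths:
--         s = p.replace("\\", "/")
--         if s.startswith("scripts/") and "lint" in s:
--             docs.update(["docs/L9/README.md", "docs/L12/README.md", "docs/L13/README.md"])
--         elif s.startswith("scripts/") and "writeback" in s:
--             docs.update(["docs/L6/README.md", "docs/L8/README.md", "docs/L10/README.md"])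
--         elif s.startswith("runtime/TOOL_REGISTRY"):
--             docs.update(["docs/L1/README.md", "docs/L1/chains", "docs/L2/README.md", "docs/L2/chains"])
--         elif s.startswith("runtime/TOOL_DOCS_STRUCTURED"):
--             docs.update(["docs/L0/README.md", "docs/L5/README.md", "docs/L10/README.md"])
--         else:
--             docs.update(["docs/L0/README.md", "docs/L13/README.md"])
--     return sorted(docs)
-- ===== SOURCE B (Python) =====
-- # Inverted mapping: instead of accumulating a doc set per path and sorting,
-- # compute five boolean "rule fired at least once" flags with whole-list any()
-- # scans, then filter a pre-sorted constant table doc -> rules. No set, no sort.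
--
-- _DOC_RULES = [
--     ("docs/L0/README.md", (3, 4)),
--     ("docs/L1/README.md", (2,)),
--     ("docs/L1/chains", (2,)),
--     ("docs/L10/README.md", (1, 3)),
--     ("docs/L12/README.md", (0,)),
--     ("docs/L13/README.md", (0, 4)),
--     ("docs/L2/README.md", (2,)),
--     ("docs/L2/chains", (2,)),
--     ("docs/L5/README.md", (3,)),
--     ("docs/L6/README.md", (1,)),
--     ("docs/L8/README.md", (1,)),
--     ("docs/L9/README.md", (0,)),
-- ]
--
--
-- def layer_docs_for_paths(paths: list[str]) -> list[str]:
--     norm = [p.replace("\\", "/") for p in paths]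
--     fired = (
--         any(s.startswith("scripts/") and "lint" in s for s in norm),
--         any(s.startswith("scripts/") and "writeback" in s and "lint" not in s
--             for s in norm),
--         any(s.startswith("runtime/TOOL_REGISTRY") for s in norm),
--         any(s.startswith("runtime/TOOL_DOCS_STRUCTURED") for s in norm),
--         any(not (s.startswith("scripts/") and ("lint" in s or "writeback" in s))
--             and not s.startswith("runtime/TOOL_REGISTRY")
--             and not s.startswith("runtime/TOOL_DOCS_STRUCTURED")
--             for s in norm),
--     )
--     return [doc for doc, rules in _DOC_RULES if any(fired[r] for r in rules)]
-- ===== Notes on version B (the rewrite author's own statement) =====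
-- stated objective: alternative
-- what changed: B inverts the mapping: it computes five 'rule fired' booleans with whole-list any() scans (no per-path fold, no growing set) and then emits the result by filtering a pre-sorted constant doc->rules table, so no set and no runtime sort exist at all.
import Mathlib
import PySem

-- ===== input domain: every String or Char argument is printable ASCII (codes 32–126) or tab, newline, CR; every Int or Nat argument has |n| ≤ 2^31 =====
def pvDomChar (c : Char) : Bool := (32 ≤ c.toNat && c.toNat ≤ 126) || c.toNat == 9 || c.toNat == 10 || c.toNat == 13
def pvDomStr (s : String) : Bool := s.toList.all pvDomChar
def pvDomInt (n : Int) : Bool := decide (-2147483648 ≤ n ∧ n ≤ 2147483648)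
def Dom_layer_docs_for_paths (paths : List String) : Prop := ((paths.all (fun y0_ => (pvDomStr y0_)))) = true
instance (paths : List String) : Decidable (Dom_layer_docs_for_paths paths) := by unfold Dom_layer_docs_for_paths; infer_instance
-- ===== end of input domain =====

-- B inverts the mapping: five whole-list any() scans decide which rules fired, then the
-- result is a filter of a pre-sorted constant doc→rules table — no per-path set building
-- and no runtime sort (objective: alternative decomposition; same result).

-- ===== PORT A =====
def layer_docs_for_paths (paths : List String) : List String :=
  PySem.List.sorted
    (paths.foldl (fun docs p =>
      let s := PySem.Str.replace p "\\" "/"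
      if PySem.Str.startswith s "scripts/" && PySem.Str.isIn "lint" s then
        PySem.Set.update docs ["docs/L9/README.md", "docs/L12/README.md", "docs/L13/README.md"]
      else if PySem.Str.startswith s "scripts/" && PySem.Str.isIn "writeback" s then
        PySem.Set.update docs ["docs/L6/README.md", "docs/L8/README.md", "docs/L10/README.md"]
      else if PySem.Str.startswith s "runtime/TOOL_REGISTRY" then
        PySem.Set.update docs ["docs/L1/README.md", "docs/L1/chains", "docs/L2/README.md", "docs/L2/chains"]
      else if PySem.Str.startswith s "runtime/TOOL_DOCS_STRUCTURED" then
        PySem.Set.update docs ["docs/L0/README.md", "docs/L5/README.md", "docs/L10/README.md"]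
      else
        PySem.Set.update docs ["docs/L0/README.md", "docs/L13/README.md"]) PySem.Set.empty)
    (fun x => x) false

-- ===== PORT B =====
-- the constant doc→rules table of Source B (already in sorted order)
def pvDocRules : List (String × List Nat) :=
  [("docs/L0/README.md", [3, 4]),
   ("docs/L1/README.md", [2]),
   ("docs/L1/chains", [2]),
   ("docs/L10/README.md", [1, 3]),
   ("docs/L12/README.md", [0]),
   ("docs/L13/README.md", [0, 4]),
   ("docs/L2/README.md", [2]),
   ("docs/L2/chains", [2]),
   ("docs/L5/README.md", [3]),
   ("docs/L6/README.md", [1]),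
   ("docs/L8/README.md", [1]),
   ("docs/L9/README.md", [0])]

-- Source B's tuple indexing fired[r]
def pvFiredIdx (f0 f1 f2 f3 f4 : Bool) (r : Nat) : Bool :=
  match r with | 0 => f0 | 1 => f1 | 2 => f2 | 3 => f3 | _ => f4

def layer_docs_for_paths_alt (paths : List String) : List String :=
  let norm := paths.map (fun p => PySem.Str.replace p "\\" "/")
  let f0 := norm.any (fun s => PySem.Str.startswith s "scripts/" && PySem.Str.isIn "lint" s)
  let f1 := norm.any (fun s => PySem.Str.startswith s "scripts/" && PySem.Str.isIn "writeback" s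
                        && !PySem.Str.isIn "lint" s)
  let f2 := norm.any (fun s => PySem.Str.startswith s "runtime/TOOL_REGISTRY")
  let f3 := norm.any (fun s => PySem.Str.startswith s "runtime/TOOL_DOCS_STRUCTURED")
  let f4 := norm.any (fun s =>
      !(PySem.Str.startswith s "scripts/" && (PySem.Str.isIn "lint" s || PySem.Str.isIn "writeback" s))
      && !PySem.Str.startswith s "runtime/TOOL_REGISTRY"
      && !PySem.Str.startswith s "runtime/TOOL_DOCS_STRUCTURED")
  (pvDocRules.filter (fun dr => dr.2.any (pvFiredIdx f0 f1 f2 f3 f4))).map Prod.fst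

-- ===== PRECONDITION & SPEC =====
def Spec_layer_docs_for_paths (paths : List String) (out : List String) : Prop := out = layer_docs_for_paths_alt paths
instance (paths : List String) (out : List String) : Decidable (Spec_layer_docs_for_paths paths out) := by unfold Spec_layer_docs_for_paths; infer_instance

-- ===== CLAIM (what is proved, stated in full; the proofs are below) =====
def Claim_equal_layer_docs_for_paths : Prop := ∀ (paths : List String), Dom_layer_docs_for_paths paths → Spec_layer_docs_for_paths paths (layer_docs_for_paths paths)

-- ===== LEMMAS AND PROOFS =====

-- proof-side helpers: A's row table keyed by the cascade's category on the normalized string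
def pvRow (c : Nat) : List String :=
  match c with
  | 0 => ["docs/L9/README.md", "docs/L12/README.md", "docs/L13/README.md"]
  | 1 => ["docs/L6/README.md", "docs/L8/README.md", "docs/L10/README.md"]
  | 2 => ["docs/L1/README.md", "docs/L1/chains", "docs/L2/README.md", "docs/L2/chains"]
  | 3 => ["docs/L0/README.md", "docs/L5/README.md", "docs/L10/README.md"]
  | _ => ["docs/L0/README.md", "docs/L13/README.md"]

def pvCat (s : String) : Nat :=
  if PySem.Str.startswith s "scripts/" && PySem.Str.isIn "lint" s then 0
  else if PySem.Str.startswith s "scripts/" && PySem.Str.isIn "writeback" s then 1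
  else if PySem.Str.startswith s "runtime/TOOL_REGISTRY" then 2
  else if PySem.Str.startswith s "runtime/TOOL_DOCS_STRUCTURED" then 3
  else 4

theorem bodyfun_eq :
    (fun (docs : PySem.Set String) (p : String) =>
      let s := PySem.Str.replace p "\\" "/"
      if PySem.Str.startswith s "scripts/" && PySem.Str.isIn "lint" s then
        PySem.Set.update docs ["docs/L9/README.md", "docs/L12/README.md", "docs/L13/README.md"]
      else if PySem.Str.startswith s "scripts/" && PySem.Str.isIn "writeback" s then
        PySem.Set.update docs ["docs/L6/README.md", "docs/L8/README.md", "docs/L10/README.md"]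
      else if PySem.Str.startswith s "runtime/TOOL_REGISTRY" then
        PySem.Set.update docs ["docs/L1/README.md", "docs/L1/chains", "docs/L2/README.md", "docs/L2/chains"]
      else if PySem.Str.startswith s "runtime/TOOL_DOCS_STRUCTURED" then
        PySem.Set.update docs ["docs/L0/README.md", "docs/L5/README.md", "docs/L10/README.md"]
      else
        PySem.Set.update docs ["docs/L0/README.md", "docs/L13/README.md"])
    = fun d p => PySem.Set.update d (pvRow (pvCat (PySem.Str.replace p "\\" "/"))) := by
  funext docs p
  simp only [pvCat]
  split_ifs <;> rfl

theorem mem_foldl_update (g : String → List String) (l : List String)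
    (acc : PySem.Set String) (x : String) :
    x ∈ l.foldl (fun d p => PySem.Set.update d (g p)) acc ↔
      x ∈ acc ∨ ∃ p ∈ l, x ∈ g p := by
  induction l generalizing acc with
  | nil => simp
  | cons a t ih =>
    simp only [List.foldl_cons, ih, PySem.Set.mem_update, List.mem_cons]
    constructor
    · rintro ((h | h) | ⟨p, hp, hx⟩)
      · exact Or.inl h
      · exact Or.inr ⟨a, Or.inl rfl, h⟩
      · exact Or.inr ⟨p, Or.inr hp, hx⟩
    · rintro (h | ⟨p, (rfl | hp), hx⟩)
      · exact Or.inl (Or.inl h)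
      · exact Or.inl (Or.inr hx)
      · exact Or.inr ⟨p, hp, hx⟩

theorem nodup_foldl_update (g : String → List String) (l : List String)
    (acc : PySem.Set String) (h : acc.Nodup) :
    (l.foldl (fun d p => PySem.Set.update d (g p)) acc).Nodup := by
  induction l generalizing acc with
  | nil => exact h
  | cons a t ih => exact ih _ (PySem.Set.nodup_update _ _ h)

-- two prefixes neither of which is a prefix of the other cannot both start s
theorem startswith_excl (s p q : String)
    (hpq : ¬ (p.toList <+: q.toList) ∧ ¬ (q.toList <+: p.toList))
    (hp : PySem.Str.startswith s p = true) : PySem.Str.startswith s q = false := by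
  by_contra h
  rw [Bool.not_eq_false] at h
  rw [PySem.Str.startswith_eq, PySem.Chars.startswith_iff] at hp h
  rcases List.prefix_or_prefix_of_prefix hp h with h' | h'
  · exact hpq.1 h'
  · exact hpq.2 h'

-- each of B's five any()-predicates holds on s exactly when A's cascade classifies s as r
theorem cat0_iff (s : String) :
    (PySem.Str.startswith s "scripts/" && PySem.Str.isIn "lint" s) = true ↔ pvCat s = 0 := by
  unfold pvCat; split_ifs with h1 h2 h3 h4 <;> simp_all

theorem cat1_iff (s : String) :
    (PySem.Str.startswith s "scripts/" && PySem.Str.isIn "writeback" s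
      && !PySem.Str.isIn "lint" s) = true ↔ pvCat s = 1 := by
  unfold pvCat; split_ifs with h1 h2 h3 h4 <;> simp_all

theorem cat2_iff (s : String) :
    PySem.Str.startswith s "runtime/TOOL_REGISTRY" = true ↔ pvCat s = 2 := by
  constructor
  · intro h
    have hs : PySem.Str.startswith s "scripts/" = false :=
      startswith_excl s "runtime/TOOL_REGISTRY" "scripts/" (by decide) h
    unfold pvCat; split_ifs with h1 h2 <;> simp_all
  · intro h
    unfold pvCat at h; split_ifs at h with h1 h2 h3 h4 <;> simp_all

theorem cat3_iff (s : String) :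
    PySem.Str.startswith s "runtime/TOOL_DOCS_STRUCTURED" = true ↔ pvCat s = 3 := by
  constructor
  · intro h
    have hs : PySem.Str.startswith s "scripts/" = false :=
      startswith_excl s "runtime/TOOL_DOCS_STRUCTURED" "scripts/" (by decide) h
    have hr : PySem.Str.startswith s "runtime/TOOL_REGISTRY" = false :=
      startswith_excl s "runtime/TOOL_DOCS_STRUCTURED" "runtime/TOOL_REGISTRY" (by decide) h
    unfold pvCat; split_ifs with h1 h2 h3 <;> simp_all
  · intro h
    unfold pvCat at h; split_ifs at h with h1 h2 h3 h4 <;> simp_all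

theorem cat4_iff (s : String) :
    (!(PySem.Str.startswith s "scripts/"
        && (PySem.Str.isIn "lint" s || PySem.Str.isIn "writeback" s))
      && !PySem.Str.startswith s "runtime/TOOL_REGISTRY"
      && !PySem.Str.startswith s "runtime/TOOL_DOCS_STRUCTURED") = true ↔ pvCat s = 4 := by
  cases hA : PySem.Str.startswith s "scripts/" <;>
    cases hL : PySem.Str.isIn "lint" s <;>
    cases hW : PySem.Str.isIn "writeback" s <;>
    cases hR : PySem.Str.startswith s "runtime/TOOL_REGISTRY" <;>
    cases hD : PySem.Str.startswith s "runtime/TOOL_DOCS_STRUCTURED" <;>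
    simp_all [pvCat]

-- rule r's any() scan fired iff some path is classified as r
theorem firedIdx_iff (paths : List String) (r : Nat) (hr : r < 5) :
    pvFiredIdx
      ((paths.map (fun p => PySem.Str.replace p "\\" "/")).any
        (fun s => PySem.Str.startswith s "scripts/" && PySem.Str.isIn "lint" s))
      ((paths.map (fun p => PySem.Str.replace p "\\" "/")).any
        (fun s => PySem.Str.startswith s "scripts/" && PySem.Str.isIn "writeback" s
          && !PySem.Str.isIn "lint" s))
      ((paths.map (fun p => PySem.Str.replace p "\\" "/")).any
        (fun s => PySem.Str.startswith s "runtime/TOOL_REGISTRY"))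
      ((paths.map (fun p => PySem.Str.replace p "\\" "/")).any
        (fun s => PySem.Str.startswith s "runtime/TOOL_DOCS_STRUCTURED"))
      ((paths.map (fun p => PySem.Str.replace p "\\" "/")).any
        (fun s =>
          !(PySem.Str.startswith s "scripts/"
              && (PySem.Str.isIn "lint" s || PySem.Str.isIn "writeback" s))
          && !PySem.Str.startswith s "runtime/TOOL_REGISTRY"
          && !PySem.Str.startswith s "runtime/TOOL_DOCS_STRUCTURED"))
      r = true
      ↔ ∃ p ∈ paths, pvCat (PySem.Str.replace p "\\" "/") = r := by
  have hmm : ∀ (pred : String → Bool),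
      ((paths.map (fun p => PySem.Str.replace p "\\" "/")).any pred = true) ↔
        ∃ p ∈ paths, pred (PySem.Str.replace p "\\" "/") = true := by
    intro pred
    simp only [List.any_eq_true, List.mem_map]
    constructor
    · rintro ⟨s, ⟨p, hp, rfl⟩, h⟩; exact ⟨p, hp, h⟩
    · rintro ⟨p, hp, h⟩; exact ⟨_, ⟨p, hp, rfl⟩, h⟩
  interval_cases r
  · simp only [pvFiredIdx, hmm]
    exact exists_congr fun p => and_congr_right fun _ => cat0_iff _
  · simp only [pvFiredIdx, hmm]
    exact exists_congr fun p => and_congr_right fun _ => cat1_iff _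
  · simp only [pvFiredIdx, hmm]
    exact exists_congr fun p => and_congr_right fun _ => cat2_iff _
  · simp only [pvFiredIdx, hmm]
    exact exists_congr fun p => and_congr_right fun _ => cat3_iff _
  · simp only [pvFiredIdx, hmm]
    exact exists_congr fun p => and_congr_right fun _ => cat4_iff _

-- table coherence: A's rows and B's inverted table describe the same doc↔rule relation
theorem row_iff_table (c : Nat) (hc : c < 5) (x : String) :
    x ∈ pvRow c ↔ ∃ e ∈ pvDocRules, x = e.1 ∧ c ∈ e.2 := by
  interval_cases c <;> simp [pvRow, pvDocRules] <;> tauto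

theorem pvCat_lt (s : String) : pvCat s < 5 := by
  unfold pvCat; split_ifs <;> omega

theorem tags_lt : ∀ e ∈ pvDocRules, ∀ r ∈ e.2, r < 5 := by decide

-- the constant doc column is strictly increasing (hence duplicate-free)
theorem docRules_fst_pairwise : (pvDocRules.map Prod.fst).Pairwise (· < ·) := by
  rw [← List.isChain_iff_pairwise]
  simp only [pvDocRules, List.map, List.isChain_cons_cons, List.isChain_singleton, and_true]
  refine ⟨?_, ?_, ?_, ?_, ?_, ?_, ?_, ?_, ?_, ?_, ?_⟩ <;>
  · rw [String.lt_iff_toList_lt]; decide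

-- ===== VERDICT (by name: the statement is the Claim_ definition above) =====
theorem layer_docs_for_paths_spec : Claim_equal_layer_docs_for_paths := by
  intro paths _
  unfold Spec_layer_docs_for_paths layer_docs_for_paths layer_docs_for_paths_alt
  rw [bodyfun_eq]
  apply PySem.List.sorted_eq_of_perm_of_pairwise_lt
  · -- B's output is a permutation of A's set: same members, both Nodup
    refine (List.perm_ext_iff_of_nodup
        ((docRules_fst_pairwise.imp ne_of_lt).sublist
          (List.filter_sublist.map Prod.fst))
        (nodup_foldl_update _ paths PySem.Set.empty List.nodup_nil)).mpr ?_
    intro x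
    rw [mem_foldl_update]
    simp only [PySem.Set.empty, List.not_mem_nil, false_or,
      List.mem_map, List.mem_filter, List.any_eq_true]
    constructor
    · rintro ⟨e, ⟨he, r, hr2, hf⟩, rfl⟩
      have hr5 : r < 5 := tags_lt e he r hr2
      rcases (firedIdx_iff paths r hr5).mp hf with ⟨p, hp, hcat⟩
      exact ⟨p, hp, (row_iff_table r hr5 e.1).mpr ⟨e, he, rfl, hr2⟩ |> (hcat ▸ ·)⟩
    · rintro ⟨p, hp, hx⟩
      rcases (row_iff_table _ (pvCat_lt _) x).mp hx with ⟨e, he, rfl, hc2⟩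
      exact ⟨e, ⟨he, _, hc2, (firedIdx_iff paths _ (pvCat_lt _)).mpr ⟨p, hp, rfl⟩⟩, rfl⟩
  · exact docRules_fst_pairwise.sublist (List.filter_sublist.map Prod.fst)
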